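-- pv_equiv track=rewrite | github.com/techspire01/campus | scheduler/edc_scheduler.py | generate_block_patterns
-- ===== SOURCE A (Python) =====
-- from itertools import product
--
-- def build_day_period_map(available_slots, days, periods_per_day):
--     per_day = {day: set() for day in days}
--     for day, period in available_slots:
--         if day in per_day and 1 <= period <= periods_per_day:
--             per_day[day].add(period)
--     return per_day
--
-- def generate_block_patterns(days, periods_per_day, available_slots, hours):
--     if hours <= 0:
--         return []
--
--     available_per_day = build_day_period_map(available_slots, days, periods_per_day)
--     patterns = set()
--
--     for day in days:
--         for start in range(1, periods_per_day - hours + 2):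
--             block = tuple((day, period) for period in range(start, start + hours))
--             if all(period in available_per_day[day] for _, period in block):
--                 patterns.add(block)
--
--     for first_len in range(1, hours):
--         second_len = hours - first_len
--         for day_one_index, day_one in enumerate(days):
--             for day_two in days[day_one_index + 1:]:
--                 for start_one, start_two in product(
--                     range(1, periods_per_day - first_len + 2),
--                     range(1, periods_per_day - second_len + 2),
--                 ):
--                     block_one = tuple((day_one, period) for period in range(start_one, start_one + first_len))
--                     block_two = tuple((day_two, period) for period in range(start_two, start_two + second_len))
--                     if all(period in available_per_day[day_one] for _, period in block_one) and all(
--                         period in available_per_day[day_two] for _, period in block_two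
--                     ):
--                         patterns.add(tuple(sorted(block_one + block_two)))
--
--     return [list(pattern) for pattern in sorted(patterns)]
-- ===== SOURCE B (Python) =====
-- def build_day_period_map(available_slots, days, periods_per_day):
--     per_day = {day: set() for day in days}
--     for day, period in available_slots:
--         if day in per_day and 1 <= period <= periods_per_day:
--             per_day[day].add(period)
--     return per_day
--
--
-- def generate_block_patterns(days, periods_per_day, available_slots, hours):
--     if hours <= 0:
--         return []
--
--     available_per_day = build_day_period_map(available_slots, days, periods_per_day)
--
--     # One backward sweep per day: run[day][p] = length of the contiguous
--     # available stretch beginning at period p.  A start s then carries a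
--     # length-L block iff run[day][s] >= L.
--     run = {}
--     for day in days:
--         r = {}
--         prev = 0
--         for p in range(periods_per_day, 0, -1):
--             prev = prev + 1 if p in available_per_day[day] else 0
--             r[p] = prev
--         run[day] = r
--
--     def starts(day, length):
--         return [s for s in range(1, periods_per_day - length + 2)
--                 if run[day].get(s, 0) >= length]
--
--     patterns = set()
--
--     for day in days:
--         for s in starts(day, hours):
--             patterns.add(tuple((day, p) for p in range(s, s + hours)))
--
--     for first_len in range(1, hours):
--         second_len = hours - first_len
--         for day_one_index, day_one in enumerate(days):
--             for day_two in days[day_one_index + 1:]: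
--                 for s1 in starts(day_one, first_len):
--                     for s2 in starts(day_two, second_len):
--                         patterns.add(tuple(sorted(
--                             tuple((day_one, p) for p in range(s1, s1 + first_len))
--                             + tuple((day_two, p) for p in range(s2, s2 + second_len)))))
--
--     return [list(pattern) for pattern in sorted(patterns)]
-- ===== Notes on version B (the rewrite author's own statement) =====
-- stated objective: alternative
-- what changed: B replaces A's per-candidate all(...) availability scan (run for every start and for every pair of starts) by one backward run-length sweep per day and then enumerates only the precomputed valid start positions, so the pair loops iterate over valid starts instead of scanning and testing every (start_one, start_two) combination.
import Mathlib
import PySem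

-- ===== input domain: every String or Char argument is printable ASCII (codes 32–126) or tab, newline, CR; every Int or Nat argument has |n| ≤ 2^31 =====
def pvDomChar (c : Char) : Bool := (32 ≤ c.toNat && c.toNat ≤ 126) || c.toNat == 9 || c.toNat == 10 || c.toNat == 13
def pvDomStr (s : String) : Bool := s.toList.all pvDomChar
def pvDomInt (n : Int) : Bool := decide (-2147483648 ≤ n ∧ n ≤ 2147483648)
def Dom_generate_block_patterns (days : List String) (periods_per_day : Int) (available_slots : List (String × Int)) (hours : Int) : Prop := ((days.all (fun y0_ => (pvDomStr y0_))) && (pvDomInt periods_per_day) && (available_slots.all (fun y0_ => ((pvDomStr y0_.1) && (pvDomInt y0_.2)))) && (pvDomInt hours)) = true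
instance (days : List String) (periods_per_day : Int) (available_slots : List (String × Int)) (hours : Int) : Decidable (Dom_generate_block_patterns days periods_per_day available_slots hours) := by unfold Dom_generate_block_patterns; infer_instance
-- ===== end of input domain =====

-- B replaces A's per-candidate `all(...)` availability scans by one backward run-length
-- sweep per day and then enumerates only the precomputed valid block starts (objective: alternative).

-- ===== PORT A =====
-- helper build_day_period_map (shared verbatim by both Python files)
def buildDayPeriodMap (available_slots : List (String × Int)) (days : List String) (periods_per_day : Int) : PySem.Dict String (PySem.Set Int) :=
  let per_day := days.foldl (fun d day => d.insert day []) PySem.Dict.empty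
  available_slots.foldl (fun d q =>
    if d.contains q.1 && decide (1 ≤ q.2) && decide (q.2 ≤ periods_per_day) then
      d.modify q.1 [] (fun s => PySem.Set.add s q.2)
    else d) per_day

def generate_block_patterns (days : List String) (periods_per_day : Int) (available_slots : List (String × Int)) (hours : Int) : List (List (String × Int)) :=
  if hours ≤ 0 then []
  else
    let available_per_day := buildDayPeriodMap available_slots days periods_per_day
    -- `available_per_day[day]` can never raise (every day is a key): getD is exact here
    let patterns : PySem.Set (List (String × Int)) :=
      days.foldl (fun pats day =>
        (PySem.List.pyRange 1 (periods_per_day - hours + 2) 1).foldl (fun pats start =>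
          let block := (PySem.List.pyRange start (start + hours) 1).map (fun period => (day, period))
          if block.all (fun q => PySem.Set.contains (available_per_day.getD day []) q.2) then
            PySem.Set.add pats block
          else pats) pats) []
    let patterns :=
      (PySem.List.pyRange 1 hours 1).foldl (fun pats first_len =>
        let second_len := hours - first_len
        (PySem.List.enumerate days).foldl (fun pats ie =>
          (PySem.List.slice days (some (ie.1 + 1)) none).foldl (fun pats day_two =>
            (PySem.List.pyRange 1 (periods_per_day - first_len + 2) 1).foldl (fun pats start_one =>
              (PySem.List.pyRange 1 (periods_per_day - second_len + 2) 1).foldl (fun pats start_two =>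
                let block_one := (PySem.List.pyRange start_one (start_one + first_len) 1).map (fun period => (ie.2, period))
                let block_two := (PySem.List.pyRange start_two (start_two + second_len) 1).map (fun period => (day_two, period))
                if block_one.all (fun q => PySem.Set.contains (available_per_day.getD ie.2 []) q.2)
                    && block_two.all (fun q => PySem.Set.contains (available_per_day.getD day_two []) q.2) then
                  PySem.Set.add pats (PySem.List.sorted2 (block_one ++ block_two) (·.1) (·.2) false)
                else pats) pats) pats) pats) pats) patterns
    PySem.List.sorted patterns (fun pat => pat.map (fun q => (toLex q : String ×ₗ Int))) false

-- ===== PORT B =====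
-- the backward sweep `for p in range(periods_per_day, 0, -1): prev = …; r[p] = prev`
def gbpAlt_runFor (avail : PySem.Set Int) (periods_per_day : Int) : PySem.Dict Int Int :=
  ((PySem.List.pyRange periods_per_day 0 (-1)).foldl
    (fun st p =>
      let prev := if PySem.Set.contains avail p then st.2 + 1 else 0
      (st.1.insert p prev, prev))
    (PySem.Dict.empty, 0)).1

def generate_block_patterns_alt (days : List String) (periods_per_day : Int) (available_slots : List (String × Int)) (hours : Int) : List (List (String × Int)) :=
  if hours ≤ 0 then []
  else
    let available_per_day := buildDayPeriodMap available_slots days periods_per_day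
    let run : PySem.Dict String (PySem.Dict Int Int) :=
      days.foldl (fun rd day => rd.insert day (gbpAlt_runFor (available_per_day.getD day []) periods_per_day)) PySem.Dict.empty
    -- `run[day]` can never raise (every day is a key): getD is exact here
    let starts := fun (day : String) (length : Int) =>
      (PySem.List.pyRange 1 (periods_per_day - length + 2) 1).filter
        (fun s => decide (length ≤ (run.getD day PySem.Dict.empty).getD s 0))
    let patterns : PySem.Set (List (String × Int)) :=
      days.foldl (fun pats day =>
        (starts day hours).foldl (fun pats s =>
          PySem.Set.add pats ((PySem.List.pyRange s (s + hours) 1).map (fun p => (day, p)))) pats) []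
    let patterns :=
      (PySem.List.pyRange 1 hours 1).foldl (fun pats first_len =>
        let second_len := hours - first_len
        (PySem.List.enumerate days).foldl (fun pats ie =>
          (PySem.List.slice days (some (ie.1 + 1)) none).foldl (fun pats day_two =>
            (starts ie.2 first_len).foldl (fun pats s1 =>
              (starts day_two second_len).foldl (fun pats s2 =>
                PySem.Set.add pats (PySem.List.sorted2
                  ((PySem.List.pyRange s1 (s1 + first_len) 1).map (fun p => (ie.2, p))
                    ++ (PySem.List.pyRange s2 (s2 + second_len) 1).map (fun p => (day_two, p)))
                  (·.1) (·.2) false)) pats) pats) pats) pats) patterns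
    PySem.List.sorted patterns (fun pat => pat.map (fun q => (toLex q : String ×ₗ Int))) false

-- ===== PRECONDITION & SPEC =====
def Spec_generate_block_patterns (days : List String) (periods_per_day : Int) (available_slots : List (String × Int)) (hours : Int) (out : List (List (String × Int))) : Prop := out = generate_block_patterns_alt days periods_per_day available_slots hours
instance (days : List String) (periods_per_day : Int) (available_slots : List (String × Int)) (hours : Int) (out : List (List (String × Int))) : Decidable (Spec_generate_block_patterns days periods_per_day available_slots hours out) := by unfold Spec_generate_block_patterns; infer_instance

-- ===== CLAIM (what is proved, stated in full; the proofs are below) =====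
def Claim_equal_generate_block_patterns : Prop := ∀ (days : List String) (periods_per_day : Int) (available_slots : List (String × Int)) (hours : Int), Dom_generate_block_patterns days periods_per_day available_slots hours → Spec_generate_block_patterns days periods_per_day available_slots hours (generate_block_patterns days periods_per_day available_slots hours)

-- ===== LEMMAS AND PROOFS =====

-- mathematical run length from s, capped at top
def gbpRcap (g : Int → Bool) (top s : Int) : Int :=
  if h : s ≤ top then (if g s then gbpRcap g top (s + 1) + 1 else 0) else 0
termination_by (top + 1 - s).toNat
decreasing_by omega

theorem gbpRcap_nonneg (g : Int → Bool) (top s : Int) : 0 ≤ gbpRcap g top s := by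
  unfold gbpRcap
  split_ifs with h1 h2
  · have := gbpRcap_nonneg g top (s + 1); omega
  · omega
  · omega
termination_by (top + 1 - s).toNat
decreasing_by omega

-- lookup in a dictionary built by inserting a value computed from each key
theorem gbp_run_lookup {ν : Type} (f : String → ν) (days : List String) (d : PySem.Dict String ν)
    (k : String) (v : ν) :
    (days.foldl (fun rd day => rd.insert day (f day)) d).getD k v
      = if k ∈ days then f k else d.getD k v := by
  induction days generalizing d with
  | nil => simp
  | cons x xs ih =>
    simp only [List.foldl_cons, ih, List.mem_cons]
    by_cases hx : k ∈ xs
    · simp [hx]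
    · rw [PySem.Dict.getD_insert]
      by_cases he : k = x <;> simp [hx, he]

-- L ≤ run length from s  ↔  the whole window [s, s+L) is available
theorem gbpRcap_ge_iff (g : Int → Bool) (top : Int) :
    ∀ (L : Nat) (s : Int), s + (L : Int) ≤ top + 1 →
      ((L : Int) ≤ gbpRcap g top s ↔ ∀ j : Nat, j < L → g (s + (j : Int)) = true) := by
  intro L
  induction L with
  | zero => intro s _; simpa using gbpRcap_nonneg g top s
  | succ n ih =>
    intro s hs
    have hstop : s ≤ top := by push_cast at hs ⊢; omega
    rw [gbpRcap]
    simp only [dif_pos hstop]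
    by_cases hg : g s = true
    · rw [if_pos hg]
      have := ih (s + 1) (by push_cast at hs ⊢; omega)
      constructor
      · intro h j hj
        rcases Nat.eq_zero_or_pos j with rfl | hjpos
        · simpa using hg
        · obtain ⟨j', rfl⟩ := Nat.exists_eq_succ_of_ne_zero (by omega : j ≠ 0)
          have := (this.mp (by omega)) j' (by omega)
          convert this using 2
          push_cast; ring
      · intro h
        have h' : ∀ j : Nat, j < n → g (s + 1 + (j : Int)) = true := by
          intro j hj
          have := h (j + 1) (by omega)
          convert this using 2
          push_cast; ring
        have := this.mpr h'
        push_cast at this ⊢; omega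
    · rw [if_neg hg]
      constructor
      · intro h; exfalso; push_cast at h; omega
      · intro h; exfalso; exact hg (by simpa using h 0 (by omega))

-- invariant of B's backward sweep: the dictionary records the capped run lengths
theorem gbpRunFor_inv (g : Int → Bool) (ppd : Int) :
    ∀ (a : Nat), (a : Int) ≤ ppd → ∀ (d : PySem.Dict Int Int) (s v : Int),
      (((PySem.List.pyRange (a : Int) 0 (-1)).foldl
          (fun st p =>
            let prev := if g p then st.2 + 1 else 0
            (st.1.insert p prev, prev))
          (d, gbpRcap g ppd ((a : Int) + 1))).1).getD s v
        = if 0 < s ∧ s ≤ (a : Int) then gbpRcap g ppd s else d.getD s v := by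
  intro a
  induction a with
  | zero =>
    intro _ d s v
    rw [PySem.List.pyRange_neg_one_eq_nil (by omega)]
    simp only [List.foldl_nil]
    have : ¬ (0 < s ∧ s ≤ (0 : Int)) := by omega
    simp [this]
  | succ n ih =>
    intro ha d s v
    rw [PySem.List.pyRange_neg_one_cons (by push_cast; omega)]
    simp only [List.foldl_cons]
    have hstep : (if g ((n : Int) + 1) then gbpRcap g ppd ((n : Int) + 1 + 1) + 1 else 0)
        = gbpRcap g ppd ((n : Int) + 1) := by
      conv_rhs => rw [gbpRcap]
      have : ((n : Int) + 1) ≤ ppd := by push_cast at ha; omega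
      simp [this]
    have harg : ((n : Int) + 1 : Int) - 1 = (n : Int) := by ring
    push_cast
    rw [hstep, harg]
    rw [ih (by push_cast at ha; omega) (d.insert ((n : Int) + 1) (gbpRcap g ppd ((n : Int) + 1))) s v]
    rw [PySem.Dict.getD_insert]
    by_cases h1 : 0 < s ∧ s ≤ (n : Int)
    · simp [h1]; intro h; omega
    · by_cases h2 : s = (n : Int) + 1
      · subst h2
        have : (0 : Int) < (n : Int) + 1 ∧ (n : Int) + 1 ≤ (n : Int) + 1 := by omega
        simp [this]
      · have : ¬ (0 < s ∧ s ≤ (n : Int) + 1) := by omega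
        simp [h1, h2, this]

theorem gbpRunFor_getD (avail : PySem.Set Int) (ppd s : Int) (h1 : 1 ≤ s) (h2 : s ≤ ppd) :
    (gbpAlt_runFor avail ppd).getD s 0 = gbpRcap (fun p => PySem.Set.contains avail p) ppd s := by
  unfold gbpAlt_runFor
  have hppd : ((ppd.toNat : Int)) = ppd := by omega
  have h0 : gbpRcap (fun p => PySem.Set.contains avail p) ppd (((ppd.toNat : Int)) + 1) = (0 : Int) := by
    rw [gbpRcap]; rw [dif_neg (by omega)]
  have hinv := gbpRunFor_inv (fun p => PySem.Set.contains avail p) ppd ppd.toNat (by omega)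
    PySem.Dict.empty s 0
  rw [h0, hppd] at hinv
  rw [hinv, if_pos (by omega)]

-- the pointwise condition equivalence: A's all-scan = B's run-length test
theorem gbp_cond_eq (avail : PySem.Set Int) (ppd L s : Int) (hL : 1 ≤ L)
    (hs : 1 ≤ s) (hse : s < ppd - L + 2) :
    ((PySem.List.pyRange s (s + L) 1).all (fun p => PySem.Set.contains avail p))
      = decide (L ≤ (gbpAlt_runFor avail ppd).getD s 0) := by
  rw [gbpRunFor_getD avail ppd s hs (by omega)]
  rw [Bool.eq_iff_iff]
  simp only [List.all_eq_true, PySem.List.mem_pyRange_one, decide_eq_true_eq]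
  have hiff := gbpRcap_ge_iff (fun p => PySem.Set.contains avail p) ppd L.toNat s (by omega)
  have hcast : ((L.toNat : Int)) = L := by omega
  rw [hcast] at hiff
  rw [hiff]
  constructor
  · intro h j hj
    exact h (s + (j : Int)) (by omega)
  · intro h x hx
    have := h (x - s).toNat (by omega)
    simp only at this
    have hxx : s + ((x - s).toNat : Int) = x := by omega
    rwa [hxx] at this

-- filtered start list: B's run-length filter equals A's all-scan filter
theorem gbp_filter_eq (days : List String) (avail : PySem.Dict String (PySem.Set Int))
    (ppd L : Int) (hL : 1 ≤ L) (day : String) (hday : day ∈ days) :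
    (PySem.List.pyRange 1 (ppd - L + 2) 1).filter
      (fun s => decide (L ≤ ((days.foldl (fun rd day => rd.insert day (gbpAlt_runFor (avail.getD day []) ppd)) PySem.Dict.empty).getD day PySem.Dict.empty).getD s 0))
    = (PySem.List.pyRange 1 (ppd - L + 2) 1).filter
      (fun s => ((PySem.List.pyRange s (s + L) 1).map (fun period => (day, period))).all
          (fun q => PySem.Set.contains (avail.getD day []) q.2)) := by
  rw [gbp_run_lookup (fun day => gbpAlt_runFor (avail.getD day []) ppd) days PySem.Dict.empty day PySem.Dict.empty, if_pos hday]
  apply List.filter_congr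
  intro s hsmem
  rw [PySem.List.mem_pyRange_one] at hsmem
  rw [List.all_map]
  have : ((fun q => PySem.Set.contains (avail.getD day []) q.2) ∘ (fun period => ((day : String), period)))
      = fun p => PySem.Set.contains (avail.getD day []) p := rfl
  rw [this, gbp_cond_eq (avail.getD day []) ppd L s hL hsmem.1 hsmem.2]

-- the product loop with a conjunction filter splits into two filtered loops
theorem gbp_pair_fold {γ : Type} (r1 r2 : List Int) (c1 c2 : Int → Bool)
    (f : γ → Int → Int → γ) (init : γ) :
    r1.foldl (fun acc s1 => r2.foldl (fun acc s2 => if c1 s1 && c2 s2 then f acc s1 s2 else acc) acc) init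
    = (r1.filter c1).foldl (fun acc s1 => (r2.filter c2).foldl (fun acc s2 => f acc s1 s2) acc) init := by
  rw [← PySem.List.foldl_if_eq_foldl_filter c1 (fun acc s1 => (r2.filter c2).foldl (fun acc s2 => f acc s1 s2) acc) r1 init]
  apply PySem.List.foldl_congr_mem
  intro acc s1 _
  by_cases h : c1 s1 = true
  · simp only [h, Bool.true_and, if_true]
    rw [PySem.List.foldl_if_eq_foldl_filter]
  · simp only [Bool.not_eq_true] at h
    simp only [h, Bool.false_and, if_false, Bool.false_eq_true]
    exact PySem.List.foldl_ignore r2 acc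

-- the one-day loops agree
theorem gbp_singles_eq (days : List String) (avail : PySem.Dict String (PySem.Set Int))
    (ppd hours : Int) (hh : 1 ≤ hours) (pats0 : PySem.Set (List (String × Int))) :
    days.foldl (fun pats day =>
      (PySem.List.pyRange 1 (ppd - hours + 2) 1).foldl (fun pats start =>
        if ((PySem.List.pyRange start (start + hours) 1).map (fun period => (day, period))).all
            (fun q => PySem.Set.contains (avail.getD day []) q.2) then
          PySem.Set.add pats ((PySem.List.pyRange start (start + hours) 1).map (fun period => (day, period)))
        else pats) pats) pats0
    = days.foldl (fun pats day =>
        ((PySem.List.pyRange 1 (ppd - hours + 2) 1).filter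
          (fun s => decide (hours ≤ ((days.foldl (fun rd day => rd.insert day (gbpAlt_runFor (avail.getD day []) ppd)) PySem.Dict.empty).getD day PySem.Dict.empty).getD s 0))).foldl
          (fun pats s => PySem.Set.add pats ((PySem.List.pyRange s (s + hours) 1).map (fun p => (day, p)))) pats) pats0 := by
  apply PySem.List.foldl_congr_mem
  intro acc day hday
  rw [PySem.List.foldl_if_eq_foldl_filter, gbp_filter_eq days avail ppd hours hh day hday]

theorem gbp_main (days : List String) (ppd hours : Int) (slots : List (String × Int)) (hh : ¬ hours ≤ 0) :
    generate_block_patterns days ppd slots hours = generate_block_patterns_alt days ppd slots hours := by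
  simp only [generate_block_patterns, generate_block_patterns_alt, if_neg hh]
  congr 1
  rw [gbp_singles_eq days (buildDayPeriodMap slots days ppd) ppd hours (by omega) []]
  apply PySem.List.foldl_congr_mem
  intro acc1 first_len hfl
  rw [PySem.List.mem_pyRange_one] at hfl
  apply PySem.List.foldl_congr_mem
  intro acc2 ie hie
  apply PySem.List.foldl_congr_mem
  intro acc3 day_two hd2
  have hie2 : ie.2 ∈ days := by
    rw [PySem.List.mem_enumerate_iff] at hie
    obtain ⟨k, hk, rfl⟩ := hie
    exact List.getElem_mem hk
  have hd2' : day_two ∈ days := PySem.List.mem_of_mem_slice _ _ _ hd2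
  rw [gbp_pair_fold]
  rw [gbp_filter_eq days (buildDayPeriodMap slots days ppd) ppd first_len (by omega) ie.2 hie2,
      gbp_filter_eq days (buildDayPeriodMap slots days ppd) ppd (hours - first_len) (by omega) day_two hd2']

-- ===== VERDICT (by name: the statement is the Claim_ definition above) =====
theorem generate_block_patterns_spec : Claim_equal_generate_block_patterns := by
  intro days periods_per_day available_slots hours _
  unfold Spec_generate_block_patterns
  by_cases hh : hours ≤ 0
  · simp [generate_block_patterns, generate_block_patterns_alt, hh]
  · exact gbp_main days periods_per_day hours available_slots hh
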